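-- pv_equiv track=rewrite | github.com/ChrisK15/leetcode-practice | codepath/TIP102/unit_2/session_2/advanced_set_1/problem_2.py | is_authentic_collection
-- ===== SOURCE A (Python) =====
-- from collections import Counter
--
-- def is_authentic_collection(art_pieces):
--     n = len(art_pieces) - 1
--     d = Counter(art_pieces)
--
--     if d.get(n, 0) != 2:
--         return False
--
--     if len(d) != n:  # Should only have n distinct numbers total
--         return False
--
--     for i in range(1, n):  # This goes from 1 to n-1
--         if d.get(i, 0) != 1: # Should appear exactly once
--             return False
--
--     return True
-- ===== SOURCE B (Python) =====
-- def is_authentic_collection(art_pieces):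
--     n = len(art_pieces) - 1
--     return sorted(art_pieces) == list(range(1, n)) + [n, n]
-- ===== Notes on version B (the rewrite author's own statement) =====
-- stated objective: simpler
-- what changed: Replaces the Counter build plus per-value count checks with a single sorted-list comparison against the closed-form expected list [1..n-1, n, n].
import Mathlib
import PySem

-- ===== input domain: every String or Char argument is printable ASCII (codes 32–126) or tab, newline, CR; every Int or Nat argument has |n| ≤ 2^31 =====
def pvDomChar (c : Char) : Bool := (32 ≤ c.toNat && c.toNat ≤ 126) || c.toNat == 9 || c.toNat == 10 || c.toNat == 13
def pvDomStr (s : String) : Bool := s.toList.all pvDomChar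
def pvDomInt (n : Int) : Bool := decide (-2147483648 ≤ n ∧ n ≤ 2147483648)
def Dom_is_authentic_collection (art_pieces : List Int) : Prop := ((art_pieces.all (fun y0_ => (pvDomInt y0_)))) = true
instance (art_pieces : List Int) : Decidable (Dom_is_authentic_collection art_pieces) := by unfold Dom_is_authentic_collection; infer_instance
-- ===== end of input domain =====

-- B replaces A's Counter build plus per-value count checks by one sorted-list comparison
-- against the expected list [1..n-1, n, n] (objective: simpler).


-- ===== PORT A =====
def is_authentic_collection (art_pieces : List Int) : Bool :=
  let n : Int := (art_pieces.length : Int) - 1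
  let d : PySem.Dict Int Int := PySem.Dict.counter art_pieces
  if d.getD n 0 ≠ 2 then false
  else if (d.size : Int) ≠ n then false
  else (PySem.List.pyRange 1 n 1).all (fun i => d.getD i 0 == 1)

-- ===== PORT B =====
def is_authentic_collection_alt (art_pieces : List Int) : Bool :=
  let n : Int := (art_pieces.length : Int) - 1
  PySem.List.sorted art_pieces (fun x => x) false == PySem.List.pyRange 1 n 1 ++ [n, n]

-- ===== PRECONDITION & SPEC =====
def Spec_is_authentic_collection (art_pieces : List Int) (out : Bool) : Prop := out = is_authentic_collection_alt art_pieces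
instance (art_pieces : List Int) (out : Bool) : Decidable (Spec_is_authentic_collection art_pieces out) := by unfold Spec_is_authentic_collection; infer_instance

-- ===== CLAIM (what is proved, stated in full; the proofs are below) =====
def Claim_equal_is_authentic_collection : Prop := ∀ (art_pieces : List Int), Dom_is_authentic_collection art_pieces → Spec_is_authentic_collection art_pieces (is_authentic_collection art_pieces)

-- ===== LEMMAS AND PROOFS =====

-- the common characterisation: count of n is 2, n distinct values, each of 1..n-1 counted once
def authP (xs : List Int) : Prop :=
  let n : Int := (xs.length : Int) - 1
  xs.count n = 2 ∧ ((PySem.Set.ofList xs).length : Int) = n ∧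
    ∀ i : Int, 1 ≤ i → i < n → xs.count i = 1

theorem count_target (n x : Int) :
    (PySem.List.pyRange 1 n 1 ++ [n, n]).count x
      = (if 1 ≤ x ∧ x < n then 1 else 0) + (if x = n then 2 else 0) := by
  rw [List.count_append]
  congr 1
  · by_cases hx : 1 ≤ x ∧ x < n
    · simp only [hx]
      exact List.count_eq_one_of_mem (PySem.List.nodup_pyRange_one 1 n)
        (by rw [PySem.List.mem_pyRange_one]; exact hx)
    · simp only [hx, if_false]
      exact List.count_eq_zero_of_not_mem (by rw [PySem.List.mem_pyRange_one]; exact hx)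
  · by_cases hx : x = n
    · subst hx; simp
    · rw [if_neg hx, List.count_eq_zero_of_not_mem (by simp [hx])]

-- A's result unfolded to the characterisation
theorem A_iff (xs : List Int) : is_authentic_collection xs = true ↔ authP xs := by
  unfold is_authentic_collection authP
  simp only [PySem.Dict.getD_counter, ne_eq, ite_not]
  have hsize : (PySem.Dict.counter xs).size = (PySem.Set.ofList xs).length := by
    have := PySem.Dict.keys_counter (xs := xs)
    calc (PySem.Dict.counter xs).size = (PySem.Dict.counter xs).keys.length := by
          simp [PySem.Dict.size, PySem.Dict.keys]
      _ = (PySem.Set.ofList xs).length := by rw [this]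
  rw [hsize]
  split_ifs with h1 h2
  · simp only [List.all_eq_true, beq_iff_eq]
    constructor
    · intro hall
      refine ⟨by exact_mod_cast h1, h2, fun i h1i h2i => ?_⟩
      have := hall i (by rw [PySem.List.mem_pyRange_one]; exact ⟨h1i, h2i⟩)
      exact_mod_cast this
    · intro ⟨_, _, hc⟩ i hi
      rw [PySem.List.mem_pyRange_one] at hi
      exact_mod_cast hc i hi.1 hi.2
  · simp only [false_iff]; intro ⟨_, hlen, _⟩; exact h2 hlen
  · simp only [false_iff]; intro ⟨hcnt, _, _⟩
    exact h1 (by exact_mod_cast hcnt)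

-- B's result unfolded to the characterisation
theorem B_iff (xs : List Int) : is_authentic_collection_alt xs = true ↔ authP xs := by
  unfold is_authentic_collection_alt authP
  simp only [beq_iff_eq]
  set n : Int := (xs.length : Int) - 1 with hn
  have hnR : n ∉ PySem.List.pyRange 1 n 1 := by
    rw [PySem.List.mem_pyRange_one]; omega
  have hTnd : (PySem.List.pyRange 1 n 1 ++ [n]).Nodup := by
    rw [List.nodup_append]
    refine ⟨PySem.List.nodup_pyRange_one 1 n, List.nodup_singleton n, ?_⟩
    intro a ha b hb
    rw [List.mem_singleton] at hb
    subst hb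
    exact fun h => hnR (h ▸ ha)
  constructor
  · -- sorted xs = target → authP
    intro hsort
    have hperm : (PySem.List.pyRange 1 n 1 ++ [n, n]).Perm xs := by
      rw [← hsort]; exact PySem.List.sorted_perm xs (fun x => x) false
    have hcount : ∀ x : Int, xs.count x
        = (if 1 ≤ x ∧ x < n then 1 else 0) + (if x = n then 2 else 0) := by
      intro x; rw [← hperm.count_eq, count_target]
    have hc2 : xs.count n = 2 := by
      rw [hcount n]; simp
    have hn1 : 1 ≤ n := by
      have := List.count_le_length (l := xs) (a := n)
      rw [hc2] at this; omega
    refine ⟨hc2, ?_, fun i h1i h2i => by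
      have hne : i ≠ n := by omega
      rw [hcount i]; simp [h1i, h2i, hne]⟩
    -- distinct count
    have hmem : ∀ x : Int, x ∈ xs ↔ x ∈ PySem.List.pyRange 1 n 1 ++ [n] := by
      intro x
      rw [← hperm.mem_iff]
      simp only [List.mem_append, PySem.List.mem_pyRange_one,
        List.mem_cons, List.not_mem_nil, or_false]
      tauto
    have hp : (PySem.Set.ofList xs).Perm (PySem.List.pyRange 1 n 1 ++ [n]) := by
      apply (List.perm_ext_iff_of_nodup (PySem.Set.nodup_ofList xs) hTnd).mpr
      intro x; rw [PySem.Set.mem_ofList]; exact hmem x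
    have hlen : (PySem.Set.ofList xs).length = (PySem.List.pyRange 1 n 1 ++ [n]).length :=
      hp.length_eq
    rw [hlen]
    simp [PySem.List.length_pyRange_one]
    omega
  · -- authP → sorted xs = target
    intro ⟨hc2, hdist, hc1⟩
    have hn1 : 1 ≤ n := by
      have := List.count_le_length (l := xs) (a := n)
      rw [hc2] at this; omega
    -- every element of target occurs in xs
    have hsub : ∀ y ∈ PySem.List.pyRange 1 n 1 ++ [n], y ∈ xs := by
      intro y hy
      rcases List.mem_append.mp hy with hy | hy
      · rw [PySem.List.mem_pyRange_one] at hy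
        exact List.count_pos_iff.mp (by rw [hc1 y hy.1 hy.2]; norm_num)
      · simp at hy; subst hy
        exact List.count_pos_iff.mp (by rw [hc2]; norm_num)
    -- the distinct elements of xs are exactly target's
    have hfin : (PySem.Set.ofList xs).toFinset = (PySem.List.pyRange 1 n 1 ++ [n]).toFinset := by
      apply (Finset.eq_of_subset_of_card_le ?_ ?_).symm
      · intro x hx
        rw [List.mem_toFinset] at hx ⊢
        rw [PySem.Set.mem_ofList]
        exact hsub x hx
      · rw [List.toFinset_card_of_nodup (PySem.Set.nodup_ofList xs),
          List.toFinset_card_of_nodup hTnd]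
        simp [PySem.List.length_pyRange_one]
        omega
    have hmem : ∀ x : Int, x ∈ xs ↔ x ∈ PySem.List.pyRange 1 n 1 ++ [n] := by
      intro x
      rw [← PySem.Set.mem_ofList (xs := xs), ← List.mem_toFinset, hfin, List.mem_toFinset]
    -- xs is a permutation of target
    have hperm : (PySem.List.pyRange 1 n 1 ++ [n, n]).Perm xs := by
      rw [List.perm_iff_count]
      intro x
      rw [count_target]
      by_cases hx : x = n
      · subst hx; simp; omega
      · by_cases hx2 : 1 ≤ x ∧ x < n
        · simp [hx, hx2]; exact (hc1 x hx2.1 hx2.2).symm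
        · simp [hx, hx2]
          apply (List.count_eq_zero_of_not_mem _).symm
          intro hmemx
          rcases List.mem_append.mp ((hmem x).mp hmemx) with h | h
          · rw [PySem.List.mem_pyRange_one] at h; exact hx2 h
          · simp at h; exact hx h
    -- target is sorted
    refine PySem.List.sorted_id_eq_of_perm_of_pairwise xs _ hperm ?_
    rw [List.pairwise_append]
    refine ⟨(PySem.List.pairwise_lt_pyRange_one 1 n).imp le_of_lt, ?_, ?_⟩
    · simp
    · intro a ha b hb
      rw [PySem.List.mem_pyRange_one] at ha
      have : b = n := by simp at hb; tauto
      omega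

-- ===== VERDICT (by name: the statement is the Claim_ definition above) =====
theorem is_authentic_collection_spec : Claim_equal_is_authentic_collection := by
  intro xs _
  unfold Spec_is_authentic_collection
  have := (A_iff xs).trans (B_iff xs).symm
  cases hA : is_authentic_collection xs <;> cases hB : is_authentic_collection_alt xs <;>
    simp_all
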